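-- pv_equiv track=rewrite | github.com/PietroSala/process-impact-benchmarks | random_diagram_generation.py | replace_underscores
-- ===== SOURCE A (Python) =====
-- def replace_underscores(input_string):
--     count = 0
--     result = ""
--     for char in input_string:
--         if char == '_':
--             count += 1
--             result += f"T{count}"
--         else:
--             result += char
--     return result
-- ===== SOURCE B (Python) =====
-- def replace_underscores(input_string):
--     parts = input_string.split('_')
--     return parts[0] + ''.join(f"T{i}{p}" for i, p in enumerate(parts[1:], 1))
-- ===== Notes on version B (the rewrite author's own statement) =====
-- stated objective: faster
-- what changed: Replaces the per-character if/else string accumulation with a single split on the underscore separator followed by joining the segments with numbered T tokens interleaved.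
import Mathlib
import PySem

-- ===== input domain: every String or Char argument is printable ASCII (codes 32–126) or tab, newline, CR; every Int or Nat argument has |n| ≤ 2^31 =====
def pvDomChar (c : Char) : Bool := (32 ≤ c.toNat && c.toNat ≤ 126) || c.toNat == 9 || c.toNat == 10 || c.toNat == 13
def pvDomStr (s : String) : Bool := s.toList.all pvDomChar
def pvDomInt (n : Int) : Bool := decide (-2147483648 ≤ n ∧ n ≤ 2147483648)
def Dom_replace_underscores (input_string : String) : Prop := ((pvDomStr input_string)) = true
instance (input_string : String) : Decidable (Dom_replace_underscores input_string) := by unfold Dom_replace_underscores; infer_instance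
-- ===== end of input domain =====

-- B replaces A's per-character accumulation by split-on-'_' plus interleaving numbered T tokens (idiomatic decomposition).

-- ===== PORT A =====
-- A's loop: state = (count, result), one step per character.
def pvGoA : List Char → Int → List Char → List Char
  | [], _, r => r
  | ch :: t, c, r =>
    if ch = '_' then pvGoA t (c + 1) (r ++ 'T' :: (PySem.Int.toStr (c + 1)).toList)
    else pvGoA t c (r ++ [ch])

def replace_underscores (input_string : String) : String :=
  String.ofList (pvGoA input_string.toList 0 [])

-- ===== PORT B =====
def replace_underscores_alt (input_string : String) : String :=
  let parts := PySem.Chars.splitOn input_string.toList ['_']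
  -- parts[0]: split never returns an empty list, so headD's default is never used
  String.ofList (parts.headD [] ++
    List.flatten ((PySem.List.enumerate (parts.drop 1) 1).map
      (fun ip => 'T' :: (PySem.Int.toStr ip.1).toList ++ ip.2)))

-- ===== PRECONDITION & SPEC =====
def Spec_replace_underscores (input_string : String) (out : String) : Prop := out = replace_underscores_alt input_string
instance (input_string : String) (out : String) : Decidable (Spec_replace_underscores input_string out) := by unfold Spec_replace_underscores; infer_instance

-- ===== CLAIM (what is proved, stated in full; the proofs are below) =====
def Claim_equal_replace_underscores : Prop := ∀ (input_string : String), Dom_replace_underscores input_string → Spec_replace_underscores input_string (replace_underscores input_string)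

-- ===== LEMMAS AND PROOFS =====

-- a clean structural recursion equal to splitOn · ['_']
def pvSp : List Char → List (List Char)
  | [] => [[]]
  | c :: rest =>
    if c = '_' then [] :: pvSp rest
    else match pvSp rest with
      | p :: ps => (c :: p) :: ps
      | [] => [[c]]

theorem pvSp_ne_nil (l : List Char) : pvSp l ≠ [] := by
  cases l with
  | nil => simp [pvSp]
  | cons c rest =>
    simp only [pvSp]
    split
    · simp
    · cases h : pvSp rest <;> simp

theorem pvGo_eq (fuel : Nat) : ∀ (l cur : List Char) (acc : List (List Char)),
    l.length < fuel →
    PySem.Chars.splitOn.go ['_'] fuel l cur acc =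
      acc.reverse ++ (match pvSp l with
        | p :: ps => (cur.reverse ++ p) :: ps
        | [] => []) := by
  induction fuel with
  | zero => intro l cur acc h; omega
  | succ fuel ih =>
    intro l cur acc h
    cases l with
    | nil => simp [PySem.Chars.splitOn.go, pvSp]
    | cons c rest =>
      by_cases hc : c = '_'
      · subst hc
        have : List.isPrefixOf ['_'] ('_' :: rest) = true := by
          simp [List.isPrefixOf]
        rw [PySem.Chars.splitOn.go, if_pos this]
        simp only [List.length_cons] at h
        rw [ih _ _ _ (by simpa using Nat.lt_of_succ_lt_succ h)]
        cases hs : pvSp rest with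
        | nil => exact absurd hs (pvSp_ne_nil rest)
        | cons p ps => simp [pvSp, hs]
      · have : List.isPrefixOf ['_'] (c :: rest) = false := by
          simp [List.isPrefixOf]
          exact fun h' => hc h'.symm
        rw [PySem.Chars.splitOn.go, if_neg (by simp [this])]
        simp only [List.length_cons] at h
        rw [ih _ _ _ (Nat.lt_of_succ_lt_succ h)]
        cases hs : pvSp rest with
        | nil => exact absurd hs (pvSp_ne_nil rest)
        | cons p ps => simp [pvSp, hs, hc]

theorem splitOn_eq_pvSp (l : List Char) : PySem.Chars.splitOn l ['_'] = pvSp l := by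
  rw [PySem.Chars.splitOn, pvGo_eq (l.length + 1) l [] [] (Nat.lt_succ_self _)]
  cases hs : pvSp l with
  | nil => exact absurd hs (pvSp_ne_nil l)
  | cons p ps => simp

-- the numbered-token rendering of the segments after the first
def pvRT : List (List Char) → Int → List Char
  | [], _ => []
  | p :: ps, c => 'T' :: (PySem.Int.toStr c).toList ++ p ++ pvRT ps (c + 1)

theorem pvGoA_eq : ∀ (l : List Char) (c : Int) (r : List Char),
    pvGoA l c r = r ++ (pvSp l).headD [] ++ pvRT ((pvSp l).drop 1) (c + 1) := by
  intro l
  induction l with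
  | nil => intro c r; simp [pvGoA, pvSp, pvRT]
  | cons ch t ih =>
    intro c r
    by_cases hc : ch = '_'
    · subst hc
      rw [pvGoA, if_pos rfl, ih]
      cases hs : pvSp t with
      | nil => exact absurd hs (pvSp_ne_nil t)
      | cons p ps => simp [pvSp, hs, pvRT]
    · rw [pvGoA, if_neg hc, ih]
      cases hs : pvSp t with
      | nil => exact absurd hs (pvSp_ne_nil t)
      | cons p ps => simp [pvSp, hs, hc]

theorem flatten_enum_eq_pvRT : ∀ (ps : List (List Char)) (k : Int),
    List.flatten ((PySem.List.enumerate ps k).map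
      (fun ip => 'T' :: (PySem.Int.toStr ip.1).toList ++ ip.2)) = pvRT ps k := by
  intro ps
  induction ps with
  | nil => intro k; simp [PySem.List.enumerate, pvRT]
  | cons p ps ih =>
    intro k
    rw [PySem.List.enumerate_cons, List.map_cons, List.flatten_cons, ih, pvRT]

-- ===== VERDICT (by name: the statement is the Claim_ definition above) =====
theorem replace_underscores_spec : Claim_equal_replace_underscores := by
  intro s _
  unfold Spec_replace_underscores replace_underscores replace_underscores_alt
  simp only [splitOn_eq_pvSp, pvGoA_eq, flatten_enum_eq_pvRT]
  simp
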